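-- pv_equiv track=rewrite | github.com/vinhisreal/TKN_algorithm | TKN.py | transaction_projection
-- ===== SOURCE A (Python) =====
-- def transaction_projection(transaction: dict, itemset: list) -> dict:
--     """
--     Project a transaction based on a given itemset.
--
--     Parameters:
--     transaction (dict): A dictionary representing a transaction, where keys are item IDs and values are their quantities.
--     itemset (list): A list of item IDs representing the itemset for projection.
--     Returns:
--     dict: A dictionary representing the projected transaction, containing only the items and quantities that are after the last item in the itemset in the original transaction.
--     """
--     projected_transaction = {}
--     # Convert itemset to a set for faster lookup
--     itemset_items = set(itemset)
--     # Check if all items in the itemset are present in the transaction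
--     if itemset_items.issubset(transaction.keys()):
--         # Get the list of items in the transaction
--         items = list(transaction.keys())
--         quantities = list(transaction.values())
--
--         # Find the index of the last item in the itemset in the transaction
--         last_index = -1
--         for i, item in enumerate(items):
--             if item in itemset_items:
--                 last_index = i
--
--         # If the last item in the itemset is found, get the items and quantities after it
--         if last_index != -1:
--             # The items and quantities after the last item in the itemset
--             for i in range(last_index + 1, len(items)):
--                 projected_transaction[items[i]] = quantities[
--                     i
--                 ]  # Save to projected_transaction
--
--     return projected_transaction
-- ===== SOURCE B (Python) =====
-- def transaction_projection(transaction: dict, itemset: list) -> dict: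
--     """Single forward pass: reset an accumulator each time an itemset member
--     is seen; what remains at the end is the suffix after the last member."""
--     itemset_items = set(itemset)
--     if not itemset_items.issubset(transaction.keys()):
--         return {}
--     acc = {}
--     seen = False
--     for item, qty in transaction.items():
--         if item in itemset_items:
--             acc = {}
--             seen = True
--         else:
--             acc[item] = qty
--     return acc if seen else {}
-- ===== Notes on version B (the rewrite author's own statement) =====
-- stated objective: alternative
-- what changed: Replaces A's two-phase approach (scan to find the last itemset member's index, then copy the suffix by index) with a single forward pass over the items that resets an accumulator dict whenever an itemset member is seen, tracking with a flag whether any member occurred.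
import Mathlib
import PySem

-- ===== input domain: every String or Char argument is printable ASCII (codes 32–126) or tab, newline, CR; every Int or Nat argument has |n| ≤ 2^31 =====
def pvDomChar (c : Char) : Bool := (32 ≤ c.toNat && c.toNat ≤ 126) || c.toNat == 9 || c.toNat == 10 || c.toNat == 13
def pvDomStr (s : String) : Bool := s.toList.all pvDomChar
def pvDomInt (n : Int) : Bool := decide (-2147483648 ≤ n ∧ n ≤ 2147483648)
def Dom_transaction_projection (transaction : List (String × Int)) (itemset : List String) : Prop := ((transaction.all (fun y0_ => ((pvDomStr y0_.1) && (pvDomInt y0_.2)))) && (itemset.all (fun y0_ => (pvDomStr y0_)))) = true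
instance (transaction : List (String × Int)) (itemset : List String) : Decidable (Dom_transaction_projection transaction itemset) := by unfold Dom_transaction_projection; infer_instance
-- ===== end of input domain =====

-- B replaces A's find-last-index-then-copy-suffix with one forward pass that resets an accumulator at each itemset member (objective: alternative; same cost).

-- ===== PORT A =====
def transaction_projection (transaction : List (String × Int)) (itemset : List String) : List (String × Int) :=
  let projected : PySem.Dict String Int := PySem.Dict.empty
  let itemsetItems : PySem.Set String := PySem.Set.ofList itemset
  if PySem.Set.issubset itemsetItems (transaction.map Prod.fst) then
    let items := transaction.map Prod.fst
    let quantities := transaction.map Prod.snd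
    let lastIndex : Int := (PySem.List.enumerate items 0).foldl
      (fun acc p => if PySem.Set.contains itemsetItems p.2 then p.1 else acc) (-1)
    if lastIndex ≠ -1 then
      ((PySem.List.pyRange (lastIndex + 1) (items.length : Int) 1).foldl
        (fun d i => d.insert (PySem.List.pyGetD items i "") (PySem.List.pyGetD quantities i 0))
        projected).items
    else projected.items
  else projected.items

-- ===== PORT B =====
def transaction_projection_alt (transaction : List (String × Int)) (itemset : List String) : List (String × Int) :=
  let itemsetItems : PySem.Set String := PySem.Set.ofList itemset
  if PySem.Set.issubset itemsetItems (transaction.map Prod.fst) then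
    let st := transaction.foldl
      (fun (s : PySem.Dict String Int × Bool) p =>
        if PySem.Set.contains itemsetItems p.1 then (PySem.Dict.empty, true)
        else (s.1.insert p.1 p.2, s.2))
      (PySem.Dict.empty, false)
    if st.2 then st.1.items else []
  else []

-- ===== PRECONDITION & SPEC =====
def Spec_transaction_projection (transaction : List (String × Int)) (itemset : List String) (out : List (String × Int)) : Prop := out = transaction_projection_alt transaction itemset
instance (transaction : List (String × Int)) (itemset : List String) (out : List (String × Int)) : Decidable (Spec_transaction_projection transaction itemset out) := by unfold Spec_transaction_projection; infer_instance

-- ===== CLAIM (what is proved, stated in full; the proofs are below) =====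
def Claim_equal_transaction_projection : Prop := ∀ (transaction : List (String × Int)) (itemset : List String), Dom_transaction_projection transaction itemset → Spec_transaction_projection transaction itemset (transaction_projection transaction itemset)

-- ===== LEMMAS AND PROOFS =====

-- A's last-index loop, abstracted over the membership test c
def pvLastIdx (c : String → Bool) (l : List (String × Int)) : Int :=
  (PySem.List.enumerate (l.map Prod.fst) 0).foldl (fun acc p => if c p.2 then p.1 else acc) (-1)

-- fold that inserts a list of pairs into the empty dict
def pvInsFold (l : List (String × Int)) : PySem.Dict String Int :=
  l.foldl (fun d p => d.insert p.1 p.2) PySem.Dict.empty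

lemma pvLastIdx_append (c : String → Bool) (l : List (String × Int)) (x : String × Int) :
    pvLastIdx c (l ++ [x]) = if c x.1 then (l.length : Int) else pvLastIdx c l := by
  simp [pvLastIdx, PySem.List.enumerate_append, List.foldl_append]

lemma pvLastIdx_bounds (c : String → Bool) (l : List (String × Int)) :
    -1 ≤ pvLastIdx c l ∧ pvLastIdx c l < (l.length : Int) := by
  induction l using List.reverseRecOn with
  | nil => simp [pvLastIdx]
  | append_singleton l x ih =>
      rw [pvLastIdx_append]
      split
      · constructor <;> simp
      · simp; omega

-- B's single pass computes (suffix after the last member, any member seen)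
lemma pvLoopB_eq (c : String → Bool) (l : List (String × Int)) :
    l.foldl
      (fun (s : PySem.Dict String Int × Bool) p =>
        if c p.1 then (PySem.Dict.empty, true)
        else (s.1.insert p.1 p.2, s.2))
      (PySem.Dict.empty, false)
    = (pvInsFold (l.drop ((pvLastIdx c l + 1).toNat)), decide (pvLastIdx c l ≠ -1)) := by
  induction l using List.reverseRecOn with
  | nil => simp [pvLastIdx, pvInsFold]
  | append_singleton l x ih =>
      rw [List.foldl_append, ih, pvLastIdx_append]
      by_cases hc : c x.1
      · have h1 : ((l.length : Int) + 1).toNat = l.length + 1 := by omega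
        simp [hc, h1, pvInsFold]
      · have hb := pvLastIdx_bounds c l
        have hle : (pvLastIdx c l + 1).toNat ≤ l.length := by omega
        rw [if_neg hc]
        simp only [List.foldl_cons, List.foldl_nil, if_neg hc]
        rw [List.drop_append_of_le_length hle]
        simp [pvInsFold, List.foldl_append]

-- ===== VERDICT (by name: the statement is the Claim_ definition above) =====
theorem transaction_projection_spec : Claim_equal_transaction_projection := by
  intro transaction itemset _
  unfold Spec_transaction_projection transaction_projection transaction_projection_alt
  simp only []
  by_cases hs : PySem.Set.issubset (PySem.Set.ofList itemset) (transaction.map Prod.fst)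
  · simp only [hs, if_true]
    rw [pvLoopB_eq (fun x => PySem.Set.contains (PySem.Set.ofList itemset) x) transaction]
    set c := fun x => PySem.Set.contains (PySem.Set.ofList itemset) x with hc
    have hlast : ((PySem.List.enumerate (transaction.map Prod.fst) 0).foldl
        (fun acc p => if PySem.Set.contains (PySem.Set.ofList itemset) p.2 then p.1 else acc) (-1)) =
        pvLastIdx c transaction := rfl
    rw [hlast]
    have hb := pvLastIdx_bounds c transaction
    by_cases hne : pvLastIdx c transaction = -1
    · simp [hne]
      rfl
    · simp only [hne, ne_eq, not_false_iff, if_true, decide_true]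
      have h0 : (0:Int) ≤ pvLastIdx c transaction + 1 := by omega
      have hbody : ∀ (d : PySem.Dict String Int) (i : Int),
          d.insert (PySem.List.pyGetD (transaction.map Prod.fst) i "")
                   (PySem.List.pyGetD (transaction.map Prod.snd) i 0)
          = (fun d (p : String × Int) => d.insert p.1 p.2) d
              (PySem.List.pyGetD transaction i ("", 0)) := by
        intro d i
        have h1 : PySem.List.pyGetD (transaction.map Prod.fst) i "" =
            (PySem.List.pyGetD transaction i (("", 0) : String × Int)).1 := by
          simpa using (PySem.List.pyGetD_map (f := Prod.fst) (xs := transaction) (i := i)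
            (d := (("", 0) : String × Int)))
        have h2 : PySem.List.pyGetD (transaction.map Prod.snd) i 0 =
            (PySem.List.pyGetD transaction i (("", 0) : String × Int)).2 := by
          simpa using (PySem.List.pyGetD_map (f := Prod.snd) (xs := transaction) (i := i)
            (d := (("", 0) : String × Int)))
        rw [h1, h2]
      have hlen : ((transaction.map Prod.fst).length : Int) = (transaction.length : Int) := by simp
      rw [hlen]
      have hfun : (fun (d : PySem.Dict String Int) (i : Int) =>
            d.insert (PySem.List.pyGetD (transaction.map Prod.fst) i "")
              (PySem.List.pyGetD (transaction.map Prod.snd) i 0))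
          = (fun d i => (fun d (p : String × Int) => d.insert p.1 p.2) d
              (PySem.List.pyGetD transaction i ("", 0))) := by
        funext d i; exact hbody d i
      rw [hfun]
      rw [PySem.List.foldl_pyRange_pyGetD' (xs := transaction) (d := ("", 0))
        (f := fun d (p : String × Int) => d.insert p.1 p.2)
        (init := PySem.Dict.empty) (a := pvLastIdx c transaction + 1) h0]
      rfl
  · simp [hs]
    rfl
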